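-- pv_equiv track=rewrite | github.com/kingAuthor1212/PyCodePair | team_allocator/team_allocator.py | jhb_physical_teams
-- ===== SOURCE A (Python) =====
-- def jhb_campus_students(student_list):
--     '''
--     from the list of students above, fill in this function to return a list of all
--     students in the Johannesburg campus only.
--     '''
--     jhb_students = []
--     for student in student_list:
--         clean_student = student.replace(" ", "").lower()
--         if "johannesburg" in clean_student:
--             jhb_students.append(clean_student)
--     return jhb_students
--
-- def jhb_physical_students(students):
--     '''
--     from the list of jhb_campus_students, fill in this function to return a list of all
--     students who will be attending physically on campus
--     '''
--     jhb_students = jhb_campus_students(students)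
--     jhb_physical_students = []
--
--     for student in jhb_students:
--         if "physical" in student:
--             jhb_physical_students.append(student)
--     return jhb_physical_students
--
-- def jhb_physical_teams(students):
--     '''
--     from the list of jhb_physical_students create list of 4 students per team, and add them to
--     one big list
--     '''
--     jhb_physical_teams = []
--     jhb_physical = jhb_physical_students(students)
--
--     while len(jhb_physical) != 0:
--         x = jhb_physical[:4]
--         jhb_physical_teams.append(x)
--         del jhb_physical[:4]
--
--     return jhb_physical_teams
-- ===== SOURCE B (Python) =====
-- def jhb_physical_teams(students):
--     # One fused pass: clean each student, test both substrings, and build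
--     # the teams incrementally with a running current team of at most 4.
--     teams = []
--     cur = []
--     for student in students:
--         clean = student.replace(" ", "").lower()
--         if "johannesburg" in clean and "physical" in clean:
--             cur.append(clean)
--             if len(cur) == 4:
--                 teams.append(cur)
--                 cur = []
--     if cur:
--         teams.append(cur)
--     return teams
-- ===== Notes on version B (the rewrite author's own statement) =====
-- stated objective: simpler
-- what changed: Replaces A's three-stage pipeline (campus filter pass, physical filter pass, then a destructive while-loop slicing the filtered list into 4s) with a single fused pass over the input that cleans, tests both substrings, and grows a running current team, flushing it at size 4.
import Mathlib
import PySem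

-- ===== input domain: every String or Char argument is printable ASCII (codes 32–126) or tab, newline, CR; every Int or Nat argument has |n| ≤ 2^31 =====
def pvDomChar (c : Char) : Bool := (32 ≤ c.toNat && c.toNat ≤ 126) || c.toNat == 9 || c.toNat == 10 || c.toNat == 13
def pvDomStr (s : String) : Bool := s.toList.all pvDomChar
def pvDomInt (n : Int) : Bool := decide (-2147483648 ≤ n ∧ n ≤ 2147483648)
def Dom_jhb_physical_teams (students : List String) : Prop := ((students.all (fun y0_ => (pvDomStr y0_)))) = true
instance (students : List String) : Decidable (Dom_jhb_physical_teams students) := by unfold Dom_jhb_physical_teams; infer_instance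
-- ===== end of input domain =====

-- B fuses A's three-stage filter/filter/chunk pipeline into one pass with a running
-- current team; same return value, objective: simpler.

-- ===== PORT A =====
-- helper jhb_campus_students: loop appending cleaned students containing "johannesburg"
def jhbCampusStudents (student_list : List String) : List String :=
  student_list.foldl (fun jhb_students student =>
    let clean_student := PySem.Str.lower (PySem.Str.replace student " " "")
    if PySem.Str.isIn "johannesburg" clean_student then jhb_students ++ [clean_student]
    else jhb_students) []

-- helper jhb_physical_students: loop over campus list keeping those containing "physical"
def jhbPhysicalStudents (students : List String) : List String :=
  (jhbCampusStudents students).foldl (fun acc student =>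
    if PySem.Str.isIn "physical" student then acc ++ [student] else acc) []

-- the while loop: x = jhb_physical[:4]; append x; del jhb_physical[:4]
-- ([:4] on a list = List.take 4 / List.drop 4, exact for this nonnegative slice)
def jhbChunkWhile (teams : List (List String)) (jhb_physical : List String) :
    List (List String) :=
  if jhb_physical = [] then teams
  else jhbChunkWhile (teams ++ [jhb_physical.take 4]) (jhb_physical.drop 4)
termination_by jhb_physical.length
decreasing_by
  rename_i h
  have : jhb_physical.length ≠ 0 := fun hn => h (List.eq_nil_of_length_eq_zero hn)
  simp [List.length_drop]; omega

def jhb_physical_teams (students : List String) : List (List String) :=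
  jhbChunkWhile [] (jhbPhysicalStudents students)

-- ===== PORT B =====
-- one fused pass: state = (finished teams, current team)
def jhbAltStep (st : List (List String) × List String) (student : String) :
    List (List String) × List String :=
  let clean := PySem.Str.lower (PySem.Str.replace student " " "")
  if PySem.Str.isIn "johannesburg" clean && PySem.Str.isIn "physical" clean then
    let cur := st.2 ++ [clean]
    if cur.length = 4 then (st.1 ++ [cur], []) else (st.1, cur)
  else st

def jhb_physical_teams_alt (students : List String) : List (List String) :=
  let st := students.foldl jhbAltStep ([], [])
  st.1 ++ (if st.2 = [] then [] else [st.2])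

-- ===== PRECONDITION & SPEC =====
def Spec_jhb_physical_teams (students : List String) (out : List (List String)) : Prop := out = jhb_physical_teams_alt students
instance (students : List String) (out : List (List String)) : Decidable (Spec_jhb_physical_teams students out) := by unfold Spec_jhb_physical_teams; infer_instance

-- ===== CLAIM (what is proved, stated in full; the proofs are below) =====
def Claim_equal_jhb_physical_teams : Prop := ∀ (students : List String), Dom_jhb_physical_teams students → Spec_jhb_physical_teams students (jhb_physical_teams students)

-- ===== LEMMAS AND PROOFS =====
set_option maxHeartbeats 1000000

-- the fused filter both sides compute (proof-only helper)
def pvFilt (students : List String) : List String :=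
  students.filterMap (fun student =>
    let clean := PySem.Str.lower (PySem.Str.replace student " " "")
    if PySem.Str.isIn "johannesburg" clean && PySem.Str.isIn "physical" clean then
      some clean
    else none)

theorem jhbCampus_acc (xs : List String) (acc : List String) :
    xs.foldl (fun jhb_students student =>
      let clean_student := PySem.Str.lower (PySem.Str.replace student " " "")
      if PySem.Str.isIn "johannesburg" clean_student then jhb_students ++ [clean_student]
      else jhb_students) acc
    = acc ++ xs.filterMap (fun student =>
        let clean := PySem.Str.lower (PySem.Str.replace student " " "")
        if PySem.Str.isIn "johannesburg" clean then some clean else none) := by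
  induction xs generalizing acc with
  | nil => simp
  | cons x xs ih =>
    simp only [List.foldl_cons, List.filterMap_cons]
    split
    · rw [ih]; simp
    · rw [ih]

theorem jhbPhys_acc (ys : List String) (acc : List String) :
    ys.foldl (fun a student =>
      if PySem.Str.isIn "physical" student then a ++ [student] else a) acc
    = acc ++ ys.filter (fun student => PySem.Str.isIn "physical" student) := by
  induction ys generalizing acc with
  | nil => simp
  | cons y ys ih =>
    simp only [List.foldl_cons, List.filter_cons]
    split
    · rw [ih]; simp
    · rw [ih]

-- generic fusion of a keep-if filterMap with a subsequent filter
theorem filter_filterMap_fused (f : String → String) (p q : String → Bool)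
    (xs : List String) :
    (xs.filterMap (fun s => if p (f s) then some (f s) else none)).filter
        (fun s => q s)
    = xs.filterMap (fun s => if p (f s) && q (f s) then some (f s) else none) := by
  induction xs with
  | nil => rfl
  | cons x xs ih =>
    by_cases hp : p (f x) = true <;> by_cases hq : q (f x) = true <;>
      simp [hp, hq, ih]

theorem jhbPhysicalStudents_eq_filt (students : List String) :
    jhbPhysicalStudents students = pvFilt students := by
  unfold jhbPhysicalStudents jhbCampusStudents pvFilt
  rw [jhbCampus_acc, jhbPhys_acc, List.nil_append]
  exact filter_filterMap_fused
    (fun s => PySem.Str.lower (PySem.Str.replace s " " ""))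
    (fun c => PySem.Str.isIn "johannesburg" c)
    (fun c => PySem.Str.isIn "physical" c) students

-- inner update of B on an already-accepted cleaned student
def pvAdd (st : List (List String) × List String) (c : String) :
    List (List String) × List String :=
  let cur := st.2 ++ [c]
  if cur.length = 4 then (st.1 ++ [cur], []) else (st.1, cur)

theorem pvAdd_eq (d : List (List String)) (u : List String) (c : String) :
    pvAdd (d, u) c
    = if (u ++ [c]).length = 4 then (d ++ [u ++ [c]], []) else (d, u ++ [c]) := rfl

theorem foldl_jhbAltStep_eq_add (xs : List String)
    (st : List (List String) × List String) :
    xs.foldl jhbAltStep st = (pvFilt xs).foldl pvAdd st := by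
  induction xs generalizing st with
  | nil => simp [pvFilt]
  | cons x xs ih =>
    by_cases hc : (PySem.Str.isIn "johannesburg"
          (PySem.Str.lower (PySem.Str.replace x " " "")) &&
        PySem.Str.isIn "physical"
          (PySem.Str.lower (PySem.Str.replace x " " ""))) = true
    · have h1 : pvFilt (x :: xs)
          = PySem.Str.lower (PySem.Str.replace x " " "") :: pvFilt xs :=
        List.filterMap_cons_some (by rw [if_pos hc])
      have h2 : jhbAltStep st x
          = pvAdd st (PySem.Str.lower (PySem.Str.replace x " " "")) := by
        unfold jhbAltStep pvAdd
        rw [if_pos hc]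
      rw [List.foldl_cons, h2, h1, List.foldl_cons]
      exact ih _
    · have h1 : pvFilt (x :: xs) = pvFilt xs :=
        List.filterMap_cons_none (by rw [if_neg hc])
      have h2 : jhbAltStep st x = st := by
        unfold jhbAltStep
        rw [if_neg hc]
      rw [List.foldl_cons, h2, h1]
      exact ih st

-- the fused fold with a partial current team equals A's chunking while-loop
theorem fold_add_eq_chunk (ys : List String) (done : List (List String))
    (cur : List String) (hcur : cur.length < 4) :
    (let st := ys.foldl pvAdd (done, cur)
     st.1 ++ (if st.2 = [] then [] else [st.2]))
    = jhbChunkWhile done (cur ++ ys) := by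
  induction ys generalizing done cur with
  | nil =>
    simp only [List.foldl_nil, List.append_nil]
    by_cases h : cur = []
    · simp [h, jhbChunkWhile]
    · rw [jhbChunkWhile, if_neg h, if_neg h,
        List.take_of_length_le (by omega), List.drop_eq_nil_of_le (by omega),
        jhbChunkWhile]
      simp
  | cons c ys ih =>
    rw [List.foldl_cons, pvAdd_eq]
    have hsplit : cur ++ c :: ys = (cur ++ [c]) ++ ys := by simp
    by_cases h4 : (cur ++ [c]).length = 4
    · rw [if_pos h4]
      conv_rhs => rw [jhbChunkWhile]
      rw [if_neg (by simp : ¬ cur ++ c :: ys = [])]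
      have h1 : (cur ++ c :: ys).take 4 = cur ++ [c] := by
        rw [hsplit, ← h4, List.take_left]
      have h2 : (cur ++ c :: ys).drop 4 = ys := by
        rw [hsplit, ← h4, List.drop_left]
      rw [h1, h2]
      exact ih (done ++ [cur ++ [c]]) [] (by simp)
    · rw [if_neg h4]
      have hlt : (cur ++ [c]).length < 4 := by
        simp only [List.length_append, List.length_cons, List.length_nil] at h4 ⊢
        omega
      rw [ih done (cur ++ [c]) hlt, hsplit]

-- ===== VERDICT (by name: the statement is the Claim_ definition above) =====
theorem jhb_physical_teams_spec : Claim_equal_jhb_physical_teams := by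
  intro students _
  unfold Spec_jhb_physical_teams jhb_physical_teams jhb_physical_teams_alt
  rw [jhbPhysicalStudents_eq_filt, foldl_jhbAltStep_eq_add]
  have := fold_add_eq_chunk (pvFilt students) [] [] (by simp)
  simpa using this.symm
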